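-- pv_equiv track=rewrite | github.com/OBugStudy/cloudnative-operator-testing | phases/testplan.py | _build_all_target_keys
-- ===== SOURCE A (Python) =====
-- from typing import Dict, List, Optional
--
-- def _make_target_key(bi: int, value: bool) -> str:
--     """生成单分支目标键，如 '1_T' 或 '42_F'。"""
--     return f"{bi}_{'T' if value else 'F'}"
--
-- def _build_all_target_keys(all_branch_indices: List[int], k: int = 1) -> List[str]:
--     """构建全量目标键列表。k=1 时每个 branch 生成 T 和 F 两个键。"""
--     if k == 1:
--         return [
--             _make_target_key(bi, v) for bi in all_branch_indices for v in (True, False)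
--         ]
--     from itertools import combinations as _comb
--     from itertools import product as _prod
--
--     keys = []
--     for combo in _comb(all_branch_indices, k):
--         for values in _prod((True, False), repeat=k):
--             keys.append(
--                 "_".join(f"{bi}_{'T' if v else 'F'}" for bi, v in zip(combo, values))
--             )
--     return keys
-- ===== SOURCE B (Python) =====
-- def _build_all_target_keys(all_branch_indices, k=1):
--     """Suffix recursion over the list: splice the (r-1)-result, chunked into
--     2**(r-1)-key blocks, with x_T/x_F prefixes; no combinations or value tuples
--     are ever materialized -- keys are built directly as strings."""
--     def build(items, r):
--         if r == 0:
--             return ['']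
--         if len(items) < r:
--             return []
--         x, rest = items[0], items[1:]
--         sub = build(rest, r - 1)
--         block = 2 ** (r - 1)
--         out = []
--         for i in range(0, len(sub), block):
--             chunk = sub[i:i + block]
--             out.extend(f"{x}_T_{s}" if s else f"{x}_T" for s in chunk)
--             out.extend(f"{x}_F_{s}" if s else f"{x}_F" for s in chunk)
--         return out + build(rest, r)
--     return build(all_branch_indices, k)
-- ===== Notes on version B (the rewrite author's own statement) =====
-- stated objective: alternative
-- what changed: B never enumerates index combinations or boolean tuples: a single suffix recursion on the list takes the already-built key list for (rest, r-1), splits it into 2^(r-1)-key blocks, prefixes each block with x_T then x_F, and appends the (rest, r) keys, so finished key strings are built directly with no join/zip/product.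
import Mathlib
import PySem

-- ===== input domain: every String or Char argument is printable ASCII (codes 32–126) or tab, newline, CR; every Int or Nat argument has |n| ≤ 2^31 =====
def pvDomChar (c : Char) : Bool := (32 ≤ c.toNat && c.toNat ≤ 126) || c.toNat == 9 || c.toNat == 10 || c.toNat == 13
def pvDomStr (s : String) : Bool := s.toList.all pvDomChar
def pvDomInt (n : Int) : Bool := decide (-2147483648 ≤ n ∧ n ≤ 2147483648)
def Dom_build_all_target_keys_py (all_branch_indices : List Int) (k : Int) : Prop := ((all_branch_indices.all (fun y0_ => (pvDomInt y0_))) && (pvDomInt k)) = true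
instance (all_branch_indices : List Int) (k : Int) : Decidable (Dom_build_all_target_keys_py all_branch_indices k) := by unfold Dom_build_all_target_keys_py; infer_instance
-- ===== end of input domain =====

-- B replaces itertools combinations×product+join by a suffix recursion that splices the
-- (rest, r-1) key list, chunked into 2^(r-1)-key blocks, with x_T/x_F prefixes
-- (objective: alternative algorithm, no combinations or value tuples materialized).

-- ===== PORT A =====
-- _make_target_key(bi, value); keys are built as List Char and packed with String.ofList at the end
def pvMkKey (bi : Int) (v : Bool) : List Char :=
  PySem.Int.toChars bi ++ '_' :: (if v then ['T'] else ['F'])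

-- itertools.combinations(l, r) (lexicographic by position), ported by hand
def pvCombA (l : List Int) (r : Nat) : List (List Int) :=
  match r, l with
  | 0, _ => [[]]
  | _ + 1, [] => []
  | r + 1, x :: xs => (pvCombA xs r).map (fun c => x :: c) ++ pvCombA xs (r + 1)

-- itertools.product((True, False), repeat=n) (leftmost position slowest, True first)
def pvProdTF : Nat → List (List Bool)
  | 0 => [[]]
  | n + 1 => (pvProdTF n).map (fun vs => true :: vs) ++ (pvProdTF n).map (fun vs => false :: vs)

def build_all_target_keys_py (all_branch_indices : List Int) (k : Int) : List String :=
  if k = 1 then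
    all_branch_indices.flatMap (fun bi => [true, false].map (fun v => String.ofList (pvMkKey bi v)))
  else
    (pvCombA all_branch_indices k.toNat).flatMap (fun combo =>
      (pvProdTF k.toNat).map (fun values =>
        String.ofList (PySem.Chars.join ['_'] ((combo.zip values).map (fun p => pvMkKey p.1 p.2)))))

-- ===== PORT B =====
-- f"{x}_T_{s}" if s else f"{x}_T" (and the same with F)
def pvTag (x : Int) (v : Bool) (s : List Char) : List Char :=
  pvMkKey x v ++ (if s = [] then [] else '_' :: s)

-- Source B's chunking loop: for i in range(0, len(sub), block): chunk = sub[i:i+block]; emit T-row, F-row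
def pvSplice (x : Int) (block : Nat) : List (List Char) → List (List Char)
  | [] => []
  | s :: rest =>
      let chunk := s :: rest.take (block - 1)
      chunk.map (pvTag x true) ++ chunk.map (pvTag x false)
        ++ pvSplice x (block) (rest.drop (block - 1))
  termination_by l => l.length
  decreasing_by
    simp only [List.length_cons]
    simp only [List.length_drop]
    omega

-- build(items, r) from Source B; the [] case of the match is where Python raises
-- IndexError (items[0] on []), reachable only for r < 0, which Pre_ excludes
def pvBuildB (items : List Int) (r : Int) : List (List Char) :=
  if r = 0 then [[]]
  else if (items.length : Int) < r then []
  else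
    match items with
    | [] => []
    | x :: rest =>
        pvSplice x (2 ^ (r - 1).toNat) (pvBuildB rest (r - 1)) ++ pvBuildB rest r
  termination_by items.length
  decreasing_by all_goals simp [*]

def build_all_target_keys_py_alt (all_branch_indices : List Int) (k : Int) : List String :=
  (pvBuildB all_branch_indices k).map String.ofList

-- ===== PRECONDITION & SPEC =====
-- A raises ValueError (combinations with negative r) for k < 0 (B raises IndexError there too)
def Pre_build_all_target_keys_py (all_branch_indices : List Int) (k : Int) : Prop := 0 ≤ k
instance (all_branch_indices : List Int) (k : Int) : Decidable (Pre_build_all_target_keys_py all_branch_indices k) := by unfold Pre_build_all_target_keys_py; infer_instance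
def pvWitness_build_all_target_keys_py : List Int × Int := ([1, 2], 2)

def Spec_build_all_target_keys_py (all_branch_indices : List Int) (k : Int) (out : List String) : Prop := out = build_all_target_keys_py_alt all_branch_indices k
instance (all_branch_indices : List Int) (k : Int) (out : List String) : Decidable (Spec_build_all_target_keys_py all_branch_indices k out) := by unfold Spec_build_all_target_keys_py; infer_instance

-- ===== CLAIM (what is proved, stated in full; the proofs are below) =====
def Claim_equal_build_all_target_keys_py : Prop := ∀ (all_branch_indices : List Int) (k : Int), Dom_build_all_target_keys_py all_branch_indices k → Pre_build_all_target_keys_py all_branch_indices k → Spec_build_all_target_keys_py all_branch_indices k (build_all_target_keys_py all_branch_indices k)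

-- ===== LEMMAS AND PROOFS =====

theorem pvMkKey_ne_nil (bi : Int) (v : Bool) : pvMkKey bi v ≠ [] := by
  simp [pvMkKey]

-- the separator-aware concatenation underlying join, tag and keysFrom
def pvGlue (p s : List Char) : List Char :=
  if p = [] then s else if s = [] then p else p ++ '_' :: s

theorem pvGlue_nil_right (p : List Char) : pvGlue p [] = p := by
  unfold pvGlue; split_ifs <;> simp_all

theorem pvGlue_assoc (p a b : List Char) (ha : a ≠ []) :
    pvGlue p (pvGlue a b) = pvGlue (pvGlue p a) b := by
  unfold pvGlue; split_ifs <;> simp_all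

theorem pvTag_eq_glue (x : Int) (v : Bool) (s : List Char) :
    pvTag x v s = pvGlue (pvMkKey x v) s := by
  unfold pvTag pvGlue
  rw [if_neg (pvMkKey_ne_nil x v)]
  by_cases hs : s = [] <;> simp [hs]

def pvJoinP (pairs : List (Int × Bool)) : List Char :=
  PySem.Chars.join ['_'] (pairs.map (fun p => pvMkKey p.1 p.2))

theorem pvJoinP_ne_nil (pairs : List (Int × Bool)) (h : pairs ≠ []) : pvJoinP pairs ≠ [] := by
  match pairs with
  | [] => exact absurd rfl h
  | [q] => simpa [pvJoinP, PySem.Chars.join_singleton] using pvMkKey_ne_nil q.1 q.2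
  | q :: q' :: rest =>
      simp [pvJoinP, PySem.Chars.join_cons_cons, pvMkKey]

theorem pvJoinP_cons (q : Int × Bool) (rest : List (Int × Bool)) :
    pvJoinP (q :: rest) = pvGlue (pvMkKey q.1 q.2) (pvJoinP rest) := by
  match rest with
  | [] => simp [pvJoinP, PySem.Chars.join_singleton, pvGlue_nil_right, PySem.Chars.join_nil]
  | r :: rs =>
      rw [pvJoinP, List.map_cons, List.map_cons, PySem.Chars.join_cons_cons, pvGlue]
      rw [if_neg (pvMkKey_ne_nil q.1 q.2), if_neg]
      · simp [pvJoinP]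
      · exact pvJoinP_ne_nil (r :: rs) (by simp)

-- all keys generated from prefix p over the remaining combo c (true branch first)
def pvKeysFrom (p : List Char) : List Int → List (List Char)
  | [] => [p]
  | bi :: rest =>
      pvKeysFrom (pvGlue p (pvMkKey bi true)) rest ++ pvKeysFrom (pvGlue p (pvMkKey bi false)) rest

-- A's product×join computes pvKeysFrom
theorem prod_join_eq_keysFrom (c : List Int) (p : List Char) :
    (pvProdTF c.length).map (fun vs => pvGlue p (pvJoinP (c.zip vs))) = pvKeysFrom p c := by
  induction c generalizing p with
  | nil => simp [pvProdTF, pvJoinP, PySem.Chars.join_nil, pvGlue_nil_right, pvKeysFrom]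
  | cons bi c ih =>
      simp only [List.length_cons, pvProdTF, List.map_append, List.map_map, pvKeysFrom]
      congr 1
      · rw [← ih (pvGlue p (pvMkKey bi true))]
        refine List.map_congr_left (fun vs _ => ?_)
        simp only [Function.comp, List.zip_cons_cons, pvJoinP_cons,
          pvGlue_assoc p _ _ (pvMkKey_ne_nil bi true)]
      · rw [← ih (pvGlue p (pvMkKey bi false))]
        refine List.map_congr_left (fun vs _ => ?_)
        simp only [Function.comp, List.zip_cons_cons, pvJoinP_cons,
          pvGlue_assoc p _ _ (pvMkKey_ne_nil bi false)]

theorem keysFrom_map (p : List Char) (c : List Int) :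
    pvKeysFrom p c = (pvKeysFrom [] c).map (fun s => pvGlue p s) := by
  induction c generalizing p with
  | nil => simp [pvKeysFrom, pvGlue_nil_right]
  | cons bi c ih =>
      rw [pvKeysFrom, pvKeysFrom, List.map_append]
      congr 1
      · rw [ih, ih (pvGlue ([] : List Char) (pvMkKey bi true)), List.map_map]
        refine List.map_congr_left (fun s _ => ?_)
        simp only [Function.comp]
        rw [show pvGlue ([] : List Char) (pvMkKey bi true) = pvMkKey bi true from by simp [pvGlue],
          pvGlue_assoc p _ _ (pvMkKey_ne_nil bi true)]
      · rw [ih, ih (pvGlue ([] : List Char) (pvMkKey bi false)), List.map_map]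
        refine List.map_congr_left (fun s _ => ?_)
        simp only [Function.comp]
        rw [show pvGlue ([] : List Char) (pvMkKey bi false) = pvMkKey bi false from by simp [pvGlue],
          pvGlue_assoc p _ _ (pvMkKey_ne_nil bi false)]

theorem keysFrom_length (p : List Char) (c : List Int) :
    (pvKeysFrom p c).length = 2 ^ c.length := by
  induction c generalizing p with
  | nil => simp [pvKeysFrom]
  | cons bi c ih => simp [pvKeysFrom, ih]; ring

theorem combA_nil_of_short (l : List Int) (n : Nat) (h : l.length < n) :
    pvCombA l n = [] := by
  induction l generalizing n with
  | nil => cases n with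
    | zero => omega
    | succ m => rfl
  | cons x xs ih =>
      cases n with
      | zero => omega
      | succ m =>
          rw [pvCombA]
          simp at h
          rw [ih m (by omega), ih (m + 1) (by omega)]
          simp

theorem length_mem_combA (l : List Int) (n : Nat) (c : List Int) (hc : c ∈ pvCombA l n) :
    c.length = n := by
  induction l generalizing n c with
  | nil =>
      cases n with
      | zero => simp [pvCombA] at hc; simp [hc]
      | succ m => simp [pvCombA] at hc
  | cons x xs ih =>
      cases n with
      | zero => simp [pvCombA] at hc; simp [hc]
      | succ m =>
          rw [pvCombA] at hc
          rcases List.mem_append.1 hc with h | h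
          · rcases List.mem_map.1 h with ⟨c', hc', rfl⟩
            simp [ih m c' hc']
          · exact ih (m + 1) c h

theorem combA_zero (l : List Int) : pvCombA l 0 = [[]] := by cases l <;> rfl

theorem combA_one (l : List Int) : pvCombA l 1 = l.map (fun x => [x]) := by
  induction l with
  | nil => rfl
  | cons x xs ih => rw [pvCombA, combA_zero, ih]; simp

-- one chunking step of B's loop
theorem splice_chunk (x : Int) (block : Nat) (hb : 1 ≤ block)
    (ys zs : List (List Char)) (hy : ys.length = block) :
    pvSplice x block (ys ++ zs)
      = ys.map (pvTag x true) ++ ys.map (pvTag x false) ++ pvSplice x block zs := by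
  match ys with
  | [] => simp at hy; omega
  | s :: ys' =>
      rw [List.cons_append, pvSplice]
      have h' : ys'.length = block - 1 := by simp at hy; omega
      rw [← h', List.take_left, List.drop_left]

theorem splice_flatMap (x : Int) (block : Nat) (hb : 1 ≤ block)
    (L : List (List Int)) (f : List Int → List (List Char))
    (hf : ∀ c ∈ L, (f c).length = block) :
    pvSplice x block (L.flatMap f)
      = L.flatMap (fun c => (f c).map (pvTag x true) ++ (f c).map (pvTag x false)) := by
  induction L with
  | nil => simp [pvSplice]
  | cons c L ih =>
      rw [List.flatMap_cons, splice_chunk x block hb _ _ (hf c (by simp)),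
        ih (fun c hc => hf c (by simp [hc]))]
      simp [List.append_assoc]

-- B's recursion computes the combinations × keysFrom flatMap
theorem buildB_eq (l : List Int) (n : Nat) :
    pvBuildB l (n : Int) = (pvCombA l n).flatMap (fun c => pvKeysFrom [] c) := by
  induction l generalizing n with
  | nil =>
      cases n with
      | zero => rw [pvBuildB]; simp [pvCombA, pvKeysFrom]
      | succ m =>
          rw [pvBuildB, if_neg (by push_cast; omega), if_pos (by simp only [List.length_nil, Nat.cast_zero]; positivity)]
          rfl
  | cons x rest ih =>
      cases n with
      | zero => rw [pvBuildB]; simp [pvCombA, pvKeysFrom]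
      | succ m =>
          rw [pvBuildB, if_neg (by omega)]
          by_cases hlen : ((x :: rest).length : Int) < ((m + 1 : Nat) : Int)
          · rw [if_pos hlen, combA_nil_of_short _ _ (by exact_mod_cast hlen)]
            rfl
          · rw [if_neg hlen]
            have hm1 : ((m + 1 : Nat) : Int) - 1 = (m : Int) := by push_cast; ring
            rw [hm1, ih m, ih (m + 1)]
            have htn : ((m : Int)).toNat = m := by simp
            rw [htn]
            rw [splice_flatMap x (2 ^ m) (Nat.one_le_two_pow) _ _
              (fun c hc => by rw [keysFrom_length, length_mem_combA rest m c hc])]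
            show _ = (pvCombA (x :: rest) (m + 1)).flatMap _
            rw [pvCombA, List.flatMap_append, List.flatMap_map]
            congr 1
            refine List.flatMap_congr (fun c _ => ?_)
            show _ = pvKeysFrom [] (x :: c)
            rw [pvKeysFrom,
              show pvGlue ([] : List Char) (pvMkKey x true) = pvMkKey x true from by simp [pvGlue],
              show pvGlue ([] : List Char) (pvMkKey x false) = pvMkKey x false from by simp [pvGlue],
              keysFrom_map (pvMkKey x true) c, keysFrom_map (pvMkKey x false) c]
            congr 1 <;> exact List.map_congr_left (fun s _ => (pvTag_eq_glue _ _ s))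

-- A's per-combo inner map, on the String level
theorem percombo (c : List Int) (n : Nat) (hn : c.length = n) :
    (pvProdTF n).map (fun values =>
        String.ofList (PySem.Chars.join ['_'] ((c.zip values).map (fun p => pvMkKey p.1 p.2))))
      = (pvKeysFrom [] c).map String.ofList := by
  subst hn
  rw [← prod_join_eq_keysFrom c ([] : List Char), List.map_map]
  refine (List.map_congr_left (fun vs _ => ?_)).symm
  simp [Function.comp, pvGlue, pvJoinP]

-- ===== VERDICT (by name: the statement is the Claim_ definition above) =====
theorem build_all_target_keys_py_spec : Claim_equal_build_all_target_keys_py := by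
  intro l k _ hk
  obtain ⟨n, rfl⟩ : ∃ n : Nat, k = (n : Int) := ⟨k.toNat, (Int.toNat_of_nonneg hk).symm⟩
  unfold Spec_build_all_target_keys_py build_all_target_keys_py build_all_target_keys_py_alt
  rw [buildB_eq l n, List.map_flatMap]
  by_cases h1 : (n : Int) = 1
  · have hn1 : n = 1 := by exact_mod_cast h1
    subst hn1
    rw [if_pos h1, combA_one, List.flatMap_map]
    refine List.flatMap_congr (fun bi _ => ?_)
    simp [pvKeysFrom, pvGlue]
  · rw [if_neg h1, Int.toNat_natCast]
    refine List.flatMap_congr (fun c hc => ?_)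
    exact percombo c n (length_mem_combA l n c hc)
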